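-- pv_equiv track=rewrite | github.com/atomisadev/acsl-practice | C_1_INT_TRANSFORM/main.py | transform
-- ===== SOURCE A (Python) =====
-- def transform(N, P):
--     # Convert the int to a str
--     n_str = str(N)
--     # Find the Pth digit from the right
--     p_digit = int(n_str[len(n_str) - P])
--     # Initialize an empty string to store the result
--     result = ''
--     for i, c in enumerate(n_str):
--         if i < len(n_str) - P:
--             result += str((int(c) + p_digit) % 10)
--         elif i > len(n_str) - P:
--             result += str(abs(int(c) - p_digit))
--         else:
--             result += c
--     return int(result)
-- ===== SOURCE B (Python) =====
-- def transform(N, P):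
--     n_str = str(N)
--     k = len(n_str) - P
--     p = int(n_str[k])
--     digits = "0123456789"
--     add = digits[p:] + digits[:p]            # add[d] is the char of (d + p) % 10
--     sub = digits[p::-1] + digits[1:10 - p]   # sub[d] is the char of abs(d - p)
--
--     def rec(j):
--         if j == len(n_str):
--             return ''
--         c = n_str[j]
--         t = add[int(c)] if j < k else sub[int(c)] if j > k else c
--         return t + rec(j + 1)
--
--     return int(rec(0))
-- ===== Notes on version B (the rewrite author's own statement) =====
-- stated objective: alternative
-- what changed: A computes each output digit arithmetically ((d+p)%10 / abs(d-p)) in one forward accumulating loop; B precomputes two 10-character translation tables by slicing/rotating '0123456789' once and then maps each digit by table lookup in a recursion over the string, so the per-digit modular arithmetic disappears.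
import Mathlib
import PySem

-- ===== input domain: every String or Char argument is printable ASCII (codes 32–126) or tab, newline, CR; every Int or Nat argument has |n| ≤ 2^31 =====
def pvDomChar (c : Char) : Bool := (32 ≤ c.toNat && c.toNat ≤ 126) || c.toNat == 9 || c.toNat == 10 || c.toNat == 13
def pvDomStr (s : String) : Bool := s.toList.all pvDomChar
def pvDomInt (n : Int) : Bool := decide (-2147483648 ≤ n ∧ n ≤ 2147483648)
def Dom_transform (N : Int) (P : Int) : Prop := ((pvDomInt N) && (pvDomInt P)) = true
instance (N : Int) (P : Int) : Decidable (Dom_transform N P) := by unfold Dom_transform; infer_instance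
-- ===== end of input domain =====

-- B replaces A's per-digit modular arithmetic inside one accumulating loop by two translation
-- tables built once from "0123456789" by slicing/rotation, applied by table lookup in a
-- recursion over the string; objective: alternative algorithm, no speed claim.

-- ===== PORT A =====
-- int(c) for a single character c; Pre_transform keeps the inputs where Python's int() succeeds
def pvCharInt (c : Char) : Int := (PySem.Int.ofChars? [c]).getD 0

def transform (N : Int) (P : Int) : Int :=
  let nStr := PySem.Int.toChars N
  let pDigit := pvCharInt ((PySem.List.pyGet? nStr ((nStr.length : Int) - P)).getD '0')
  let result := (PySem.List.enumerate nStr).foldl (fun acc ic =>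
      if ic.1 < (nStr.length : Int) - P then
        acc ++ PySem.Int.toChars (PySem.Int.mod (pvCharInt ic.2 + pDigit) 10)
      else if (nStr.length : Int) - P < ic.1 then
        acc ++ PySem.Int.toChars |pvCharInt ic.2 - pDigit|
      else
        acc ++ [ic.2]) []
  (PySem.Int.ofChars? result).getD 0

-- ===== PORT B =====
-- the literal "0123456789" of Source B
def pvDigitsLit : List Char := ['0','1','2','3','4','5','6','7','8','9']

-- add = digits[p:] + digits[:p]
def pvAdd (p : Int) : List Char :=
  PySem.List.slice pvDigitsLit (some p) none ++ PySem.List.slice pvDigitsLit none (some p)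

-- sub = digits[p::-1] + digits[1:10-p]
def pvSub (p : Int) : List Char :=
  (PySem.List.slice? pvDigitsLit (some p) none (-1)).getD [] ++
    PySem.List.slice pvDigitsLit (some 1) (some (10 - p))

-- rec(j): Python tests 'j == len(n_str)'; '≤' is only a totality guard (rec is never
-- called with j > len), the computation is the same
def pvRec (s : List Char) (k : Int) (add sub : List Char) (j : Nat) : List Char :=
  if h : s.length ≤ j then []
  else
    let c := s[j]'(by omega)
    let t : List Char :=
      if (j : Int) < k then [(PySem.List.pyGet? add (pvCharInt c)).getD '0']
      else if k < (j : Int) then [(PySem.List.pyGet? sub (pvCharInt c)).getD '0']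
      else [c]
    t ++ pvRec s k add sub (j + 1)
termination_by s.length - j

def transform_alt (N : Int) (P : Int) : Int :=
  let nStr := PySem.Int.toChars N
  let k : Int := (nStr.length : Int) - P
  let p := pvCharInt ((PySem.List.pyGet? nStr k).getD '0')
  (PySem.Int.ofChars? (pvRec nStr k (pvAdd p) (pvSub p) 0)).getD 0

-- ===== PRECONDITION & SPEC =====
-- Pre_ excludes exactly the inputs where Python A raises: N < 0 (int('-') → ValueError)
-- and P outside 1..2*len(str(N)) (pivot index out of range → IndexError).
def Pre_transform (N : Int) (P : Int) : Prop :=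
  0 ≤ N ∧ 1 ≤ P ∧ P ≤ 2 * ((PySem.Int.toChars N).length : Int)
instance (N : Int) (P : Int) : Decidable (Pre_transform N P) := by unfold Pre_transform; infer_instance

def pvWitness_transform : Int × Int := (123, 2)

def Spec_transform (N : Int) (P : Int) (out : Int) : Prop := out = transform_alt N P
instance (N : Int) (P : Int) (out : Int) : Decidable (Spec_transform N P out) := by unfold Spec_transform; infer_instance

-- ===== CLAIM (what is proved, stated in full; the proofs are below) =====
def Claim_equal_transform : Prop := ∀ (N : Int) (P : Int), Dom_transform N P → Pre_transform N P → Spec_transform N P (transform N P)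

-- ===== LEMMAS AND PROOFS =====

-- A's three-way branch as a function of one (index, char) pair
def pvF (k p : Int) : Int × Char → List Char := fun ic =>
  if ic.1 < k then PySem.Int.toChars (PySem.Int.mod (pvCharInt ic.2 + p) 10)
  else if k < ic.1 then PySem.Int.toChars |pvCharInt ic.2 - p|
  else [ic.2]

theorem pv_digitChar_mem (m : Nat) (h : m < 10) : Nat.digitChar m ∈ pvDigitsLit := by
  have key : ∀ a : Fin 10, Nat.digitChar (a : Nat) ∈ pvDigitsLit := by decide
  exact key ⟨m, h⟩

theorem pv_toDigitsCore_mem :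
    ∀ (f n : Nat) (acc : List Char), (∀ c ∈ acc, c ∈ pvDigitsLit) →
      ∀ c ∈ Nat.toDigitsCore 10 f n acc, c ∈ pvDigitsLit := by
  intro f
  induction f with
  | zero => intro n acc hacc; simpa [Nat.toDigitsCore] using hacc
  | succ f ih =>
    intro n acc hacc c hc
    simp only [Nat.toDigitsCore] at hc
    split at hc
    · rcases List.mem_cons.1 hc with h | h
      · exact h ▸ pv_digitChar_mem _ (Nat.mod_lt _ (by norm_num))
      · exact hacc c h
    · refine ih (n / 10) _ ?_ c hc
      intro d hd
      rcases List.mem_cons.1 hd with h | h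
      · exact h ▸ pv_digitChar_mem _ (Nat.mod_lt _ (by norm_num))
      · exact hacc d h

theorem pv_toChars_mem (N : Int) (h : 0 ≤ N) :
    ∀ c ∈ PySem.Int.toChars N, c ∈ pvDigitsLit := by
  simp only [PySem.Int.toChars, if_neg (by omega : ¬ N < 0)]
  unfold Nat.toDigits
  exact pv_toDigitsCore_mem _ _ _ (by simp)

theorem pv_charInt_bounds (c : Char) (hc : c ∈ pvDigitsLit) :
    0 ≤ pvCharInt c ∧ pvCharInt c < 10 := by
  fin_cases hc <;> decide

theorem pv_add_char (p d : Int) (hp0 : 0 ≤ p) (hp : p < 10) (hd0 : 0 ≤ d) (hd : d < 10) :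
    [(PySem.List.pyGet? (pvAdd p) d).getD '0']
      = PySem.Int.toChars (PySem.Int.mod (d + p) 10) := by
  have key : ∀ a b : Fin 10,
      [(PySem.List.pyGet? (pvAdd ((a : Nat) : Int)) ((b : Nat) : Int)).getD '0']
        = PySem.Int.toChars (PySem.Int.mod (((b : Nat) : Int) + ((a : Nat) : Int)) 10) := by
    decide
  have hpe : p = ((p.toNat : Nat) : Int) := by omega
  have hde : d = ((d.toNat : Nat) : Int) := by omega
  rw [hpe, hde]
  exact key ⟨p.toNat, by omega⟩ ⟨d.toNat, by omega⟩

theorem pv_sub_char (p d : Int) (hp0 : 0 ≤ p) (hp : p < 10) (hd0 : 0 ≤ d) (hd : d < 10) :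
    [(PySem.List.pyGet? (pvSub p) d).getD '0']
      = PySem.Int.toChars |d - p| := by
  have key : ∀ a b : Fin 10,
      [(PySem.List.pyGet? (pvSub ((a : Nat) : Int)) ((b : Nat) : Int)).getD '0']
        = PySem.Int.toChars |((b : Nat) : Int) - ((a : Nat) : Int)| := by
    decide
  have hpe : p = ((p.toNat : Nat) : Int) := by omega
  have hde : d = ((d.toNat : Nat) : Int) := by omega
  rw [hpe, hde]
  exact key ⟨p.toNat, by omega⟩ ⟨d.toNat, by omega⟩

-- the recursion of B yields exactly the flatMap of A's branch function over the suffix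
theorem pv_rec_eq (s : List Char) (k p : Int)
    (hdig : ∀ c ∈ s, c ∈ pvDigitsLit) (hp0 : 0 ≤ p) (hp : p < 10) :
    ∀ (m j : Nat), j + m = s.length →
      pvRec s k (pvAdd p) (pvSub p) j
        = (PySem.List.enumerate (s.drop j) (j : Int)).flatMap (pvF k p) := by
  intro m
  induction m with
  | zero =>
    intro j hj
    rw [pvRec, dif_pos (by omega : s.length ≤ j)]
    simp [List.drop_of_length_le (by omega : s.length ≤ j), PySem.List.enumerate_nil]
  | succ m ih =>
    intro j hj
    have hjl : j < s.length := by omega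
    rw [pvRec, dif_neg (by omega : ¬ s.length ≤ j)]
    have hdrop : s.drop j = s[j] :: s.drop (j + 1) := (List.getElem_cons_drop hjl).symm
    rw [hdrop, PySem.List.enumerate_cons, List.flatMap_cons]
    have hmem : s[j] ∈ s := List.getElem_mem hjl
    obtain ⟨hd0, hd⟩ := pv_charInt_bounds _ (hdig _ hmem)
    have hcast : ((j + 1 : Nat) : Int) = (j : Int) + 1 := by push_cast; ring
    rw [ih (j + 1) (by omega), hcast]
    have hhead : (if (j : Int) < k then [(PySem.List.pyGet? (pvAdd p) (pvCharInt s[j])).getD '0']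
        else if k < (j : Int) then [(PySem.List.pyGet? (pvSub p) (pvCharInt s[j])).getD '0']
        else [s[j]]) = pvF k p ((j : Int), s[j]) := by
      simp only [pvF]
      split_ifs with h1 h2
      · exact pv_add_char p _ hp0 hp hd0 hd
      · exact pv_sub_char p _ hp0 hp hd0 hd
      · rfl
    exact congrArg (fun l => l ++ List.flatMap (pvF k p)
      (PySem.List.enumerate (List.drop (j + 1) s) ((j : Int) + 1))) hhead

-- ===== VERDICT (by name: the statement is the Claim_ definition above) =====
theorem transform_spec : Claim_equal_transform := by
  unfold Claim_equal_transform Spec_transform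
  intro N P _ hpre
  obtain ⟨hN, hP1, hP2⟩ := hpre
  unfold transform transform_alt
  simp only []
  set nStr := PySem.Int.toChars N with hn
  set k : Int := (nStr.length : Int) - P with hk
  -- the pivot character is a digit of nStr
  have hrange : PySem.Raise.InRange nStr.length k := by
    constructor <;> [skip; skip] <;> omega
  obtain ⟨c, hc⟩ : ∃ c, PySem.List.pyGet? nStr k = some c := by
    rcases h : PySem.List.pyGet? nStr k with _ | c
    · exact absurd hrange ((PySem.List.pyGet?_eq_none_iff nStr k).1 h)
    · exact ⟨c, rfl⟩
  have hcmem : c ∈ nStr := PySem.List.mem_of_pyGet?_eq_some nStr hc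
  have hdig : ∀ ch ∈ nStr, ch ∈ pvDigitsLit := pv_toChars_mem N hN
  set pDigit := pvCharInt ((PySem.List.pyGet? nStr k).getD '0') with hp
  have hpd : pDigit = pvCharInt c := by rw [hp, hc]; rfl
  obtain ⟨hp0, hplt⟩ := pv_charInt_bounds c (hdig c hcmem)
  have hfun : (fun (acc : List Char) (ic : Int × Char) =>
        if ic.1 < k then acc ++ PySem.Int.toChars (PySem.Int.mod (pvCharInt ic.2 + pDigit) 10)
        else if k < ic.1 then acc ++ PySem.Int.toChars |pvCharInt ic.2 - pDigit|
        else acc ++ [ic.2])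
      = (fun acc ic => acc ++ pvF k pDigit ic) := by
    funext acc ic
    simp only [pvF]
    split_ifs <;> rfl
  rw [hfun, PySem.List.foldl_append_eq_flatMap, List.nil_append]
  rw [pv_rec_eq nStr k pDigit hdig (hpd ▸ hp0) (hpd ▸ hplt) nStr.length 0 (by omega)]
  simp
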